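-- pv_equiv track=rewrite | github.com/Harsh4518/Python-InfyTQ-Training-Module | Infytq Python/Minimum Cost Reverse.py | minicost
-- ===== SOURCE A (Python) =====
-- def minicost(arr,revcost):
--
--     n=len(arr)
--     dp=[[float('inf')]*2 for i in range(n)]
--
--     dp[0][0]=0
--     dp[0][1]=1
--
--     revstr=[i[::-1] for i in arr]
--
--     for i in range(1,n):
--
--         for j in range(2):
--
--             curstr=arr[i] if j==0 else revstr[i]
--             curcost=0 if j==0 else revcost[i]
--
--             if curstr>=arr[i-1]:
--
--                 dp[i][j]=min(dp[i][j],dp[i-1][0]+curcost)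
--
--             if curstr>=revstr[i-1]:
--
--                 dp[i][j]=min(dp[i][j],dp[i-1][1]+curcost)
--
--     res=min(dp[n-1][0],dp[n-1][1])
--
--     if res==float('inf'):
--
--         return -1
--
--     else:
--
--         return res
-- ===== SOURCE B (Python) =====
-- def minicost(arr, revcost):
--     # Tropical (min-plus) algebra formulation: each adjacent pair contributes a 2x2
--     # transition matrix over min-plus (None = +inf); the answer is the initial vector
--     # (0, 1) multiplied by the product of all matrices, computed by divide and conquer.
--     n = len(arr)
--     if n == 0:
--         return 0
--
--     def mp_add(a, b):
--         return None if a is None or b is None else a + b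
--
--     def mp_min(a, b):
--         if a is None:
--             return b
--         if b is None:
--             return a
--         return min(a, b)
--
--     def mul(A, B):
--         return tuple(
--             tuple(mp_min(mp_add(A[k][0], B[0][j]), mp_add(A[k][1], B[1][j]))
--                   for j in range(2))
--             for k in range(2))
--
--     def mat(i):
--         prev, cur = arr[i - 1], arr[i]
--         pv = (prev, prev[::-1])
--         cv = (cur, cur[::-1])
--         cost = (0, revcost[i])
--         return tuple(
--             tuple(cost[j] if cv[j] >= pv[k] else None for j in range(2))
--             for k in range(2))
--
--     mats = [mat(i) for i in range(1, n)]
--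
--     def prod(lo, hi):  # product of mats[lo:hi], hi - lo >= 1
--         if hi - lo == 1:
--             return mats[lo]
--         mid = (lo + hi) // 2
--         return mul(prod(lo, mid), prod(mid, hi))
--
--     v = (0, 1)
--     if mats:
--         P = prod(0, len(mats))
--         v = tuple(mp_min(mp_add(v[0], P[0][j]), mp_add(v[1], P[1][j]))
--                   for j in range(2))
--     r = mp_min(v[0], v[1])
--     return -1 if r is None else r
-- ===== Notes on version B (the rewrite author's own statement) =====
-- stated objective: alternative
-- what changed: B reformulates the problem in the tropical (min-plus) semiring: each adjacent pair yields a 2x2 transition matrix (None = +inf), the list of matrices is multiplied by a divide-and-conquer recursion exploiting associativity, and the answer is the initial vector (0,1) applied to the product; A instead fills an n x 2 float('inf') DP table sequentially with in-place min updates.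
-- crash fix: On arr == [] A raises IndexError at dp[0][0]; B returns 0 (an empty list is non-decreasing at no cost). For len(arr) >= 2 with revcost shorter than arr both A and B raise IndexError, so those inputs are simply outside Pre_. — e.g. on minicost([], []): A raises IndexError, B returns 0
import Mathlib
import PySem

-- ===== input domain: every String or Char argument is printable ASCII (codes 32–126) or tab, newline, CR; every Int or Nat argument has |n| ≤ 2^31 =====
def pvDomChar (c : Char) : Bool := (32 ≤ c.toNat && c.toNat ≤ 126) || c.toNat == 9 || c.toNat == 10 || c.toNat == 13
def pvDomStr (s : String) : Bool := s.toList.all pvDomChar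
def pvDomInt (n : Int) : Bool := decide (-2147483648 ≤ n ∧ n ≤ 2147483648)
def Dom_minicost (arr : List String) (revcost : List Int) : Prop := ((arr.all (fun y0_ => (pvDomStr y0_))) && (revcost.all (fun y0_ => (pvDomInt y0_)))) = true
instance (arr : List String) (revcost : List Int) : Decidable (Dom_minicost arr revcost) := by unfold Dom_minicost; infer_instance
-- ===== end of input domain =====

-- B recasts A's sequential two-state DP as a tropical (min-plus) 2x2 matrix product over the
-- adjacent pairs, computed by a divide-and-conquer recursion on the matrix list; same cost class.

-- ===== PORT A =====
-- float('inf') is representable in the Int dp only as 'none': pvInfMin/pvInfAdd are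
-- min/+ with none = +inf, exact for the values A manipulates (ints and inf).
def pvInfMin (a b : Option Int) : Option Int :=
  match a, b with
  | none, b => b
  | some x, none => some x
  | some x, some y => some (min x y)

def pvInfAdd (a : Option Int) (c : Int) : Option Int := a.map (· + c)

-- Python fills dp row i reading only row i-1, so the mutated presized table is ported as a
-- grown list whose last element is dp[i-1]; the inner j-loop is unrolled to its two iterations.
def minicost (arr : List String) (revcost : List Int) : Int :=
  let n : Int := arr.length
  let revstr := arr.map (fun s => String.ofList s.toList.reverse)
  let dp : List (Option Int × Option Int) :=
    (PySem.List.pyRange 1 n 1).foldl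
      (fun dp i =>
        let prevRow := dp.getLastD (none, none)
        -- j = 0 : curstr = arr[i], curcost = 0
        let cur0 := PySem.List.pyGetD arr i ""
        let d0 :=
          let d : Option Int := none
          let d := if PySem.List.pyGetD arr (i-1) "" ≤ cur0 then pvInfMin d (pvInfAdd prevRow.1 0) else d
          if PySem.List.pyGetD revstr (i-1) "" ≤ cur0 then pvInfMin d (pvInfAdd prevRow.2 0) else d
        -- j = 1 : curstr = revstr[i], curcost = revcost[i]
        let cur1 := PySem.List.pyGetD revstr i ""
        let c1 := PySem.List.pyGetD revcost i 0
        let d1 :=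
          let d : Option Int := none
          let d := if PySem.List.pyGetD arr (i-1) "" ≤ cur1 then pvInfMin d (pvInfAdd prevRow.1 c1) else d
          if PySem.List.pyGetD revstr (i-1) "" ≤ cur1 then pvInfMin d (pvInfAdd prevRow.2 c1) else d
        dp ++ [(d0, d1)])
      [(some 0, some 1)]
  let last := dp.getLastD (none, none)
  match pvInfMin last.1 last.2 with
  | none => -1
  | some v => v

-- ===== PORT B =====
-- min-plus scalar ops of Source B: None = +inf
def pvMpAdd (a b : Option Int) : Option Int :=
  match a, b with
  | some x, some y => some (x + y)
  | _, _ => none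

def pvMpMin (a b : Option Int) : Option Int :=
  match a, b with
  | none, b => b
  | some x, none => some x
  | some x, some y => some (min x y)

-- 2x2 matrix as row pair of pairs; entry (k,j) = cost of moving from prev-state k to cur-state j
def pvMul (A B : (Option Int × Option Int) × (Option Int × Option Int)) :
    (Option Int × Option Int) × (Option Int × Option Int) :=
  ((pvMpMin (pvMpAdd A.1.1 B.1.1) (pvMpAdd A.1.2 B.2.1),
    pvMpMin (pvMpAdd A.1.1 B.1.2) (pvMpAdd A.1.2 B.2.2)),
   (pvMpMin (pvMpAdd A.2.1 B.1.1) (pvMpAdd A.2.2 B.2.1),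
    pvMpMin (pvMpAdd A.2.1 B.1.2) (pvMpAdd A.2.2 B.2.2)))

def pvMatAt (arr : List String) (revcost : List Int) (i : Int) :
    (Option Int × Option Int) × (Option Int × Option Int) :=
  let prev := PySem.List.pyGetD arr (i - 1) ""
  let cur := PySem.List.pyGetD arr i ""
  let pv := (prev, String.ofList prev.toList.reverse)
  let cv := (cur, String.ofList cur.toList.reverse)
  let cost : Int × Int := (0, PySem.List.pyGetD revcost i 0)
  ((if pv.1 ≤ cv.1 then some cost.1 else none, if pv.1 ≤ cv.2 then some cost.2 else none),
   (if pv.2 ≤ cv.1 then some cost.1 else none, if pv.2 ≤ cv.2 then some cost.2 else none))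

-- product of mats[lo:hi] by divide and conquer; Python calls it only with hi - lo ≥ 1,
-- the '≤ 1' (rather than '= 1') guard only makes the Lean recursion total
def pvProd (mats : List ((Option Int × Option Int) × (Option Int × Option Int))) (lo hi : Nat) :
    (Option Int × Option Int) × (Option Int × Option Int) :=
  if hi - lo ≤ 1 then mats.getD lo ((none, none), (none, none))
  else pvMul (pvProd mats lo ((lo + hi) / 2)) (pvProd mats ((lo + hi) / 2) hi)
termination_by hi - lo
decreasing_by all_goals omega

def pvVecMul (v : Option Int × Option Int)
    (P : (Option Int × Option Int) × (Option Int × Option Int)) : Option Int × Option Int :=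
  (pvMpMin (pvMpAdd v.1 P.1.1) (pvMpAdd v.2 P.2.1),
   pvMpMin (pvMpAdd v.1 P.1.2) (pvMpAdd v.2 P.2.2))

def minicost_alt (arr : List String) (revcost : List Int) : Int :=
  let n : Int := arr.length
  if arr.length = 0 then 0
  else
    let mats := (PySem.List.pyRange 1 n 1).map (pvMatAt arr revcost)
    let v : Option Int × Option Int := (some 0, some 1)
    let v := if mats ≠ [] then pvVecMul v (pvProd mats 0 mats.length) else v
    match pvMpMin v.1 v.2 with
    | none => -1
    | some r => r

-- ===== PRECONDITION & SPEC =====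
-- A raises IndexError on arr = [] (dp[0][0]) and, when len(arr) ≥ 2, on revcost shorter
-- than arr (revcost[i]); exactly those inputs are excluded.
def Pre_minicost (arr : List String) (revcost : List Int) : Prop :=
  arr ≠ [] ∧ (arr.length = 1 ∨ arr.length ≤ revcost.length)
instance (arr : List String) (revcost : List Int) : Decidable (Pre_minicost arr revcost) := by
  unfold Pre_minicost; infer_instance

def pvWitness_minicost : List String × List Int := (["ba", "ab", "zz"], [0, 2, 1])

-- On an empty arr A raises IndexError; B returns 0 (an empty list is non-decreasing at no cost).
def Raises_minicost (arr : List String) (_revcost : List Int) : Prop := arr = []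
instance (arr : List String) (revcost : List Int) : Decidable (Raises_minicost arr revcost) := by
  unfold Raises_minicost; infer_instance
def pvRaiseWitness_minicost : List String × List Int := ([], [])
def pvRaiseWitnessOut_minicost : Int := 0

def Spec_minicost (arr : List String) (revcost : List Int) (out : Int) : Prop := out = minicost_alt arr revcost
instance (arr : List String) (revcost : List Int) (out : Int) : Decidable (Spec_minicost arr revcost out) := by unfold Spec_minicost; infer_instance

-- ===== CLAIM (what is proved, stated in full; the proofs are below) =====
def Claim_equal_minicost : Prop := ∀ (arr : List String) (revcost : List Int), Dom_minicost arr revcost → Pre_minicost arr revcost → Spec_minicost arr revcost (minicost arr revcost)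
def Claim_raises_minicost : Prop := (∀ (arr : List String) (revcost : List Int), Dom_minicost arr revcost → Raises_minicost arr revcost → ¬ Pre_minicost arr revcost) ∧ (Dom_minicost (pvRaiseWitness_minicost.1) (pvRaiseWitness_minicost.2) ∧ Raises_minicost (pvRaiseWitness_minicost.1) (pvRaiseWitness_minicost.2) ∧ minicost_alt (pvRaiseWitness_minicost.1) (pvRaiseWitness_minicost.2) = pvRaiseWitnessOut_minicost)

-- ===== LEMMAS AND PROOFS =====

-- the common step both reductions target, on Nat index k (Python's i = k+1)
def pvStep (arr : List String) (revcost : List Int) (st : Option Int × Option Int) (k : Nat) :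
    Option Int × Option Int :=
  let prev := arr.getD k ""
  let prevR := String.ofList prev.toList.reverse
  let cur := arr.getD (k+1) ""
  let curR := String.ofList cur.toList.reverse
  let c1 := revcost.getD (k+1) 0
  let d0 :=
    let d : Option Int := none
    let d := if prev ≤ cur then pvInfMin d (pvInfAdd st.1 0) else d
    if prevR ≤ cur then pvInfMin d (pvInfAdd st.2 0) else d
  let d1 :=
    let d : Option Int := none
    let d := if prev ≤ curR then pvInfMin d (pvInfAdd st.1 c1) else d
    if prevR ≤ curR then pvInfMin d (pvInfAdd st.2 c1) else d
  (d0, d1)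

theorem lastD_grow {α β : Type} (l : List α) (g : β → α → β) (d : β) :
    ∀ (dp0 : List β) (st : β), dp0.getLastD d = st →
      ((l.foldl (fun dp i => dp ++ [g (dp.getLastD d) i]) dp0).getLastD d) = l.foldl g st := by
  induction l with
  | nil => intro dp0 st h; simpa using h
  | cons x xs ih =>
      intro dp0 st h
      simp only [List.foldl_cons]
      rw [h]
      exact ih (dp0 ++ [g st x]) (g st x) List.getLastD_concat

theorem pvStrNil : ("" : String) = String.ofList (("" : String).toList.reverse) := rfl

theorem pyGetD_rev (arr : List String) (i : Int) :
    PySem.List.pyGetD (arr.map (fun s => String.ofList s.toList.reverse)) i "" =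
    String.ofList (PySem.List.pyGetD arr i "").toList.reverse := by
  conv_lhs => rw [pvStrNil, PySem.List.pyGetD_map]

-- scalar facts of the tropical semiring (Option Int, pvMpMin, pvMpAdd)
theorem mpadd_assoc (a b c : Option Int) :
    pvMpAdd (pvMpAdd a b) c = pvMpAdd a (pvMpAdd b c) := by
  cases a <;> cases b <;> cases c <;> simp [pvMpAdd, Int.add_assoc]

theorem mpadd_min_left (a b c : Option Int) :
    pvMpAdd a (pvMpMin b c) = pvMpMin (pvMpAdd a b) (pvMpAdd a c) := by
  cases a <;> cases b <;> cases c <;> first | rfl | (simp [pvMpAdd, pvMpMin]; try omega)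

theorem mpadd_min_right (a b c : Option Int) :
    pvMpAdd (pvMpMin a b) c = pvMpMin (pvMpAdd a c) (pvMpAdd b c) := by
  cases a <;> cases b <;> cases c <;> first | rfl | (simp [pvMpAdd, pvMpMin]; try omega)

theorem mpmin_min_min_comm (a b c d : Option Int) :
    pvMpMin (pvMpMin a b) (pvMpMin c d) = pvMpMin (pvMpMin a c) (pvMpMin b d) := by
  cases a <;> cases b <;> cases c <;> cases d <;> first | rfl | (simp [pvMpMin]; try omega)

-- vector-matrix associativity of the tropical product
theorem vecMul_mul (v : Option Int × Option Int)
    (A B : (Option Int × Option Int) × (Option Int × Option Int)) :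
    pvVecMul v (pvMul A B) = pvVecMul (pvVecMul v A) B := by
  simp only [pvVecMul, pvMul, mpadd_min_left, mpadd_min_right, ← mpadd_assoc,
    Prod.mk.injEq]
  exact ⟨mpmin_min_min_comm _ _ _ _, mpmin_min_min_comm _ _ _ _⟩

-- the divide-and-conquer product applied to a vector is the sequential fold over the slice
theorem vec_prodDC (mats : List ((Option Int × Option Int) × (Option Int × Option Int))) :
    ∀ (fuel lo hi : Nat), hi - lo ≤ fuel → lo < hi → hi ≤ mats.length →
    ∀ (v : Option Int × Option Int),
      pvVecMul v (pvProd mats lo hi) =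
        ((mats.drop lo).take (hi - lo)).foldl pvVecMul v := by
  intro fuel
  induction fuel with
  | zero => intro lo hi hf h1 h2 v; omega
  | succ f ih =>
      intro lo hi hf h1 h2 v
      by_cases hb : hi - lo ≤ 1
      · have hlo : lo < mats.length := by omega
        have hd : mats.drop lo = mats[lo] :: mats.drop (lo + 1) :=
          List.drop_eq_getElem_cons hlo
        have h1' : hi - lo = 1 := by omega
        rw [pvProd, if_pos hb, h1']
        have ht : List.take 1 (List.drop lo mats) = [mats[lo]] := by rw [hd]; rfl
        rw [ht]
        simp [List.getD_eq_getElem?_getD, List.getElem?_eq_getElem hlo]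
      · rw [pvProd, if_neg hb]
        have hmid1 : lo < (lo + hi) / 2 := by omega
        have hmid2 : (lo + hi) / 2 < hi := by omega
        rw [vecMul_mul,
            ih lo ((lo + hi) / 2) (by omega) hmid1 (by omega),
            ih ((lo + hi) / 2) hi (by omega) hmid2 h2]
        have hsplit : (mats.drop lo).take (hi - lo) =
            (mats.drop lo).take ((lo + hi) / 2 - lo) ++
            (mats.drop ((lo + hi) / 2)).take (hi - (lo + hi) / 2) := by
          have he : hi - lo = ((lo + hi) / 2 - lo) + (hi - (lo + hi) / 2) := by omega
          have hmidlo : lo + ((lo + hi) / 2 - lo) = (lo + hi) / 2 := by omega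
          rw [he, List.take_add, List.drop_drop, hmidlo]
        rw [hsplit, List.foldl_append]

-- one tropical step equals one DP step
theorem vecMul_matAt (arr : List String) (revcost : List Int) (k : Nat)
    (v : Option Int × Option Int) :
    pvVecMul v (pvMatAt arr revcost ((k : Int) + 1)) = pvStep arr revcost v k := by
  obtain ⟨v0, v1⟩ := v
  have e2 : ((k : Int) + 1) = ((k + 1 : Nat) : Int) := by push_cast; ring
  have e1 : ((k + 1 : Nat) : Int) - 1 = ((k : Nat) : Int) := by push_cast; ring
  simp only [pvMatAt, e2]
  simp only [e1, PySem.List.pyGetD_natCast]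
  simp only [pvVecMul, pvStep, Prod.mk.injEq]
  constructor <;>
    (split_ifs <;> cases v0 <;> cases v1 <;>
      simp [pvMpAdd, pvMpMin, pvInfMin, pvInfAdd])

-- the final min/-1 combine of A and of B agree
theorem final_eq (st : Option Int × Option Int) :
    (match pvInfMin st.1 st.2 with
     | none => (-1 : Int)
     | some v => v) =
    (match pvMpMin st.1 st.2 with
     | none => (-1 : Int)
     | some r => r) := by
  obtain ⟨a, b⟩ := st
  cases a <;> cases b <;> simp [pvInfMin, pvMpMin]

theorem minicost_spec' (arr : List String) (revcost : List Int) (hne : arr ≠ []) :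
    minicost arr revcost = minicost_alt arr revcost := by
  set m : Nat := arr.length - 1 with hm
  -- ---- reduce A to the common index fold ----
  have hA : minicost arr revcost =
      (match pvInfMin ((List.range m).foldl (pvStep arr revcost) (some 0, some 1)).1
              ((List.range m).foldl (pvStep arr revcost) (some 0, some 1)).2 with
       | none => (-1 : Int)
       | some v => v) := by
    have hmn : ((arr.length : Int) - 1).toNat = m := by omega
    have hrange : PySem.List.pyRange 1 (arr.length : Int) 1 =
        (List.range m).map (fun (k : Nat) => (1 : Int) + (k : Int)) := by
      rw [PySem.List.pyRange_one, hmn]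
    unfold minicost
    simp only [hrange, List.foldl_map]
    rw [PySem.List.foldl_congr_mem _ _
        (fun dp k => dp ++ [pvStep arr revcost (dp.getLastD (none, none)) k]) _
        (by
          intro acc k hk
          have e2 : (1 : Int) + (k : Int) - 1 = ((k : Nat) : Int) := by ring
          have e1 : (1 : Int) + (k : Int) = ((k + 1 : Nat) : Int) := by push_cast; ring
          simp only [e2]
          simp only [e1]
          simp only [pyGetD_rev]
          simp only [PySem.List.pyGetD_natCast, pvStep])]
    rw [lastD_grow (List.range m) (pvStep arr revcost) (none, none) [(some 0, some 1)]
        (some 0, some 1) rfl]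
  -- ---- reduce B to the common index fold ----
  have hB : minicost_alt arr revcost =
      (match pvMpMin ((List.range m).foldl (pvStep arr revcost) (some 0, some 1)).1
              ((List.range m).foldl (pvStep arr revcost) (some 0, some 1)).2 with
       | none => (-1 : Int)
       | some r => r) := by
    have hlen : arr.length ≠ 0 := by
      cases arr with
      | nil => exact absurd rfl hne
      | cons a l => simp
    have hmn : ((arr.length : Int) - 1).toNat = m := by omega
    have hrange : PySem.List.pyRange 1 (arr.length : Int) 1 =
        (List.range m).map (fun (k : Nat) => (1 : Int) + (k : Int)) := by
      rw [PySem.List.pyRange_one, hmn]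
    unfold minicost_alt
    rw [if_neg hlen]
    simp only [hrange, List.map_map]
    by_cases hm0 : m = 0
    · simp [hm0]
    · have hmats_ne : (List.range m).map
          ((pvMatAt arr revcost) ∘ (fun (k : Nat) => (1 : Int) + (k : Int))) ≠ [] := by
        simp [hm0]
      rw [if_pos hmats_ne]
      have hlen2 : ((List.range m).map
          ((pvMatAt arr revcost) ∘ (fun (k : Nat) => (1 : Int) + (k : Int)))).length = m := by
        simp
      rw [hlen2]
      have hfold : pvVecMul (some 0, some 1)
          (pvProd ((List.range m).map
            ((pvMatAt arr revcost) ∘ (fun (k : Nat) => (1 : Int) + (k : Int)))) 0 m) =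
          (List.range m).foldl (pvStep arr revcost) (some 0, some 1) := by
        rw [vec_prodDC _ m 0 m (by omega) (by omega) (le_of_eq hlen2.symm)]
        rw [Nat.sub_zero, List.drop_zero, List.take_of_length_le hlen2.le, List.foldl_map]
        exact PySem.List.foldl_congr_mem _ _ (pvStep arr revcost) _
          (by
            intro acc k hk
            have e : (1 : Int) + (k : Int) = (k : Int) + 1 := by ring
            simpa [Function.comp, e] using vecMul_matAt arr revcost k acc)
      rw [hfold]
  rw [hA, hB]
  exact final_eq _

-- ===== VERDICT (by name: the statement is the Claim_ definition above) =====
theorem minicost_spec : Claim_equal_minicost := by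
  intro arr revcost _ hpre
  exact minicost_spec' arr revcost hpre.1

def minicost_raises : Claim_raises_minicost := by
  unfold Claim_raises_minicost
  constructor
  · intro arr revcost _ hr hp; exact hp.1 hr
  · exact ⟨by decide, rfl, by decide⟩
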